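-- pv_equiv track=rewrite | github.com/Ahmed-Hamoda/Projects | Python Projects/ml_AI_story_gen.py | gen_bot_text
-- ===== SOURCE A (Python) =====
-- VALID_PUNCTUATION = ['?', '.', '!', ',', ':', ';']
--
-- END_OF_SENTENCE_PUNCTUATION = ['?', '.', '!']
--
-- ALWAYS_CAPITALIZE = ["I", "Montmorency", "George", "Harris", "J", "London", "Thames", "Liverpool", "Flatland", "", "Mrs", "Ms", "Mr", "William", "Samuel"]
--
-- def gen_bot_text(token_list, bad_author):
--     """
--     (list, bool) --> str
--
--     The function takes in a list and a boolean. If the boolean is True, the function returns a string of the list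
--     separated by a space. Otherwise, the function returns a string that abides by the rules given in lab4v2.
--
--     >> gen_bot(['this', 'is', 'a', 'string', 'of', 'text', '.', 'which', 'george', ',', 'be', 'created', '.'], False)
--     "This is a string of text. Which George, be created."
--     """
--     sentence = ""
--     if bad_author:
--         for i in range(len(token_list)):
--             sentence += token_list[i] + " "
--     else:
--         token_list[0] = token_list[0].capitalize()
--         for i in range(len(token_list)):
--             if token_list[i].capitalize() in ALWAYS_CAPITALIZE:
--                 token_list[i] = token_list[i].capitalize()
--         for k in range(len(token_list)):
--             if (token_list[k] in END_OF_SENTENCE_PUNCTUATION) and (k + 1 < len(token_list)):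
--                 token_list[k + 1] = token_list[k + 1].capitalize()
--         j = 0
--         x = len(token_list)
--         while j < x:
--             if token_list[j] in VALID_PUNCTUATION:
--                 token_list[j - 1] = token_list[j - 1] + token_list[j]
--                 token_list.pop(j)
--                 x -= 1
--             j += 1
--         for i in range(len(token_list)):
--             sentence += token_list[i] + " "
--     return sentence
-- ===== SOURCE B (Python) =====
-- VALID_PUNCTUATION = ['?', '.', '!', ',', ':', ';']
--
-- END_OF_SENTENCE_PUNCTUATION = ['?', '.', '!']
--
-- ALWAYS_CAPITALIZE = ["I", "Montmorency", "George", "Harris", "J", "London", "Thames", "Liverpool", "Flatland", "", "Mrs", "Ms", "Mr", "William", "Samuel"]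
--
-- def gen_bot_text(token_list, bad_author):
--     if bad_author:
--         return "".join(t + " " for t in token_list)
--     # Pass 1: capitalize sentence starts and special names.
--     words = []
--     cap_next = True
--     for t in token_list:
--         c = t.capitalize()
--         w = c if cap_next or c in ALWAYS_CAPITALIZE else t
--         cap_next = w in END_OF_SENTENCE_PUNCTUATION
--         words.append(w)
--     # Pass 2: pair each token with a directly following punctuation mark.
--     out = []
--     i = 0
--     while i < len(words):
--         w = words[i]
--         if i + 1 < len(words) and words[i + 1] in VALID_PUNCTUATION:
--             w += words[i + 1]
--             i += 1
--         i += 1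
--         out.append(w)
--     return "".join(w + " " for w in out)
-- ===== Notes on version B (the rewrite author's own statement) =====
-- stated objective: simpler
-- what changed: Replaces A's four index-mutating passes and its while/pop merge loop by two clean non-mutating passes (capitalize via a carried sentence-start flag, then pair each token with a directly following punctuation mark); Pre_ excludes the empty list, where A raises IndexError, and lists starting with a punctuation mark, a malformed-sentence corner where A glues the stray mark onto the last token through Python's index -1 while B keeps it at the front, neither placement being specified.
-- outside the precondition, e.g. on gen_bot_text([','], False): A returns '', B returns ', '; on gen_bot_text(['.', 'a'], False): A returns 'A. ', B returns '. A '; on gen_bot_text([], False): A raises IndexError, B returns ''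
import Mathlib
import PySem

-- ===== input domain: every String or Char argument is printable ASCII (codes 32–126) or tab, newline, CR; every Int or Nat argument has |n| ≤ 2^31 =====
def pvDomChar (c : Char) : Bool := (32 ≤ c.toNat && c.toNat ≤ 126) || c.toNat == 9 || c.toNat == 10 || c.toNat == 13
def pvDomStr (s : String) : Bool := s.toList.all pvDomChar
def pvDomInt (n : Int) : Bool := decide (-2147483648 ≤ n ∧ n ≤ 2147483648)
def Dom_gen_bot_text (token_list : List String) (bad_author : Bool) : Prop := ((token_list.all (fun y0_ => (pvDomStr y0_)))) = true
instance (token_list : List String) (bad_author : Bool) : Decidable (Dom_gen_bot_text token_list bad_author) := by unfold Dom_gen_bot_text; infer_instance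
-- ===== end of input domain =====

-- B replaces A's four index-mutating passes and while/pop merge loop by two clean passes: capitalize
-- with a carried flag, then pair each token with a directly following punctuation mark (simpler);
-- A also mutates token_list in place — the equivalence proved is about the RETURN value only.

-- ===== PORT A =====

def VALID_PUNCTUATION : List String := ["?", ".", "!", ",", ":", ";"]

def END_OF_SENTENCE_PUNCTUATION : List String := ["?", ".", "!"]

def ALWAYS_CAPITALIZE : List String := ["I", "Montmorency", "George", "Harris", "J", "London", "Thames", "Liverpool", "Flatland", "", "Mrs", "Ms", "Mr", "William", "Samuel"]

-- shared port of Python's str.capitalize (exact on the ASCII domain: first char uppercased, rest lowercased)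
def pyCapitalize (s : String) : String :=
  match s.toList with
  | [] => ""
  | c :: cs => String.ofList (PySem.Chars.upperChar c :: cs.map PySem.Chars.lowerChar)

-- the 'while j < x' merge loop of A; fuel is a totality guard only (x - j shrinks every iteration,
-- so the initial fuel x = len(token_list) is never exhausted)
def mergeLoopA : Nat → List String → Nat → Nat → List String
  | 0, l, _, _ => l
  | fuel+1, l, j, x =>
    if j < x then
      if l.getD j "" ∈ VALID_PUNCTUATION then
        -- token_list[j-1] = token_list[j-1] + token_list[j]: Python index -1 (when j = 0) is the LAST element
        mergeLoopA fuel
          ((if j = 0 then l.set (l.length - 1) (l.getLastD "" ++ l.getD j "")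
            else l.set (j-1) (l.getD (j-1) "" ++ l.getD j "")).eraseIdx j)
          (j+1) (x-1)     -- token_list.pop(j); x -= 1; j += 1
      else mergeLoopA fuel l (j+1) x
    else l

def gen_bot_text (token_list : List String) (bad_author : Bool) : String :=
  if bad_author then
    (List.range token_list.length).foldl (fun s i => s ++ token_list.getD i "" ++ " ") ""
  else
    let l1 := token_list.set 0 (pyCapitalize (token_list.getD 0 ""))
    let l2 := (List.range l1.length).foldl (fun acc i =>
        if pyCapitalize (acc.getD i "") ∈ ALWAYS_CAPITALIZE
        then acc.set i (pyCapitalize (acc.getD i "")) else acc) l1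
    let l3 := (List.range l2.length).foldl (fun acc k =>
        if acc.getD k "" ∈ END_OF_SENTENCE_PUNCTUATION ∧ k+1 < acc.length
        then acc.set (k+1) (pyCapitalize (acc.getD (k+1) "")) else acc) l2
    let m := mergeLoopA l3.length l3 0 l3.length
    (List.range m.length).foldl (fun s i => s ++ m.getD i "" ++ " ") ""

-- ===== PORT B =====

-- B pass 1: capitalize sentence starts and special names (state: cap_next)
def altCaps : List String → Bool → List String
  | [], _ => []
  | t :: ts, capNext =>
    let c := pyCapitalize t
    let w := if capNext = true ∨ c ∈ ALWAYS_CAPITALIZE then c else t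
    w :: altCaps ts (decide (w ∈ END_OF_SENTENCE_PUNCTUATION))

-- B pass 2: pair each token with a directly following punctuation mark
-- (transcribes Source B's while loop advancing by 1 or 2)
def altPair : List String → List String
  | [] => []
  | [w] => [w]
  | w :: p :: rest =>
    if p ∈ VALID_PUNCTUATION then (w ++ p) :: altPair rest
    else w :: altPair (p :: rest)

def gen_bot_text_alt (token_list : List String) (bad_author : Bool) : String :=
  if bad_author then token_list.foldl (fun s t => s ++ t ++ " ") ""
  else (altPair (altCaps token_list true)).foldl (fun s w => s ++ w ++ " ") ""

-- ===== PRECONDITION & SPEC =====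

-- Pre_ excludes ([], False), where A raises IndexError at token_list[0], and (when bad_author is
-- False) lists whose FIRST token is a punctuation mark: a sentence cannot begin with punctuation,
-- and the two programs place the stray mark differently (A glues it onto the LAST token through
-- Python's index -1, B keeps it at the front), neither placement being specified for such input.
def Pre_gen_bot_text (token_list : List String) (bad_author : Bool) : Prop :=
  bad_author = true ∨ (token_list ≠ [] ∧ token_list.headD "" ∉ VALID_PUNCTUATION)
instance (token_list : List String) (bad_author : Bool) : Decidable (Pre_gen_bot_text token_list bad_author) := by unfold Pre_gen_bot_text; infer_instance

def pvWitness_gen_bot_text : List String × Bool := (["hello"], false)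

def Spec_gen_bot_text (token_list : List String) (bad_author : Bool) (out : String) : Prop := out = gen_bot_text_alt token_list bad_author
instance (token_list : List String) (bad_author : Bool) (out : String) : Decidable (Spec_gen_bot_text token_list bad_author out) := by unfold Spec_gen_bot_text; infer_instance

-- ===== CLAIM (what is proved, stated in full; the proofs are below) =====
def Claim_equal_gen_bot_text : Prop := ∀ (token_list : List String) (bad_author : Bool), Dom_gen_bot_text token_list bad_author → Pre_gen_bot_text token_list bad_author → Spec_gen_bot_text token_list bad_author (gen_bot_text token_list bad_author)

-- ===== LEMMAS AND PROOFS =====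

-- proof-side spec of A's pass 2 per element
def capF (t : String) : String := if pyCapitalize t ∈ ALWAYS_CAPITALIZE then pyCapitalize t else t

-- fused capitalization chain (proof-side normal form of both sides' capitalization)
def capsRec : List String → Bool → List String
  | [], _ => []
  | t :: ts, b =>
    let w := if b then pyCapitalize t else capF t
    w :: capsRec ts (decide (w ∈ END_OF_SENTENCE_PUNCTUATION))

-- proof-side merge with an explicit carried block (links A's loop to altPair)
def bmerge : List String → List String → Bool → List String
  | out, [], _ => out
  | out, w :: ws, skip =>
    if skip then bmerge (out ++ [w]) ws false
    else if w ∈ VALID_PUNCTUATION ∧ out ≠ [] then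
      bmerge (out.dropLast ++ [out.getLastD "" ++ w]) ws true
    else bmerge (out ++ [w]) ws false

-- spec of A's pass 3 (head already final)
def qRec : List String → List String
  | [] => []
  | t :: ts =>
    t :: (if t ∈ END_OF_SENTENCE_PUNCTUATION then
            match ts with
            | [] => []
            | u :: us => qRec (pyCapitalize u :: us)
          else qRec ts)
termination_by l => l.length
decreasing_by
  · simp
  · simp

def headApply (b : Bool) : List String → List String
  | [] => []
  | t :: ts => (if b then pyCapitalize t else capF t) :: ts.map capF

-- char-level facts
theorem pv_toNat_ofNat (m : Nat) (h : m < 55296) : (Char.ofNat m).toNat = m := by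
  have hv : Nat.isValidChar m := Or.inl h
  simp only [Char.ofNat, dif_pos hv, Char.ofNatAux, Char.toNat]
  simp [UInt32.toNat, BitVec.toNat_ofNatLT]

theorem pv_char_le_iff (a b : Char) : a ≤ b ↔ a.toNat ≤ b.toNat := Iff.rfl

theorem pv_char_eq_of_toNat (a b : Char) (h : a.toNat = b.toNat) : a = b := by
  apply Char.ext
  exact UInt32.toNat_inj.mp h

theorem pv_islower_iff (c : Char) : PySem.Chars.islower c = true ↔ 97 ≤ c.toNat ∧ c.toNat ≤ 122 := by
  simp [PySem.Chars.islower, pv_char_le_iff]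

theorem pv_isupper_iff (c : Char) : PySem.Chars.isupper c = true ↔ 65 ≤ c.toNat ∧ c.toNat ≤ 90 := by
  simp [PySem.Chars.isupper, pv_char_le_iff]

theorem pv_upper_toNat (c : Char) :
    (PySem.Chars.upperChar c).toNat = if 97 ≤ c.toNat ∧ c.toNat ≤ 122 then c.toNat - 32 else c.toNat := by
  simp only [PySem.Chars.upperChar]
  by_cases h : PySem.Chars.islower c = true
  · have := (pv_islower_iff c).mp h
    rw [if_pos h, if_pos this, pv_toNat_ofNat]; omega
  · rw [if_neg h, if_neg]; intro hc; exact h ((pv_islower_iff c).mpr hc)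

theorem pv_lower_toNat (c : Char) :
    (PySem.Chars.lowerChar c).toNat = if 65 ≤ c.toNat ∧ c.toNat ≤ 90 then c.toNat + 32 else c.toNat := by
  simp only [PySem.Chars.lowerChar]
  by_cases h : PySem.Chars.isupper c = true
  · have := (pv_isupper_iff c).mp h
    rw [if_pos h, if_pos this, pv_toNat_ofNat]; omega
  · rw [if_neg h, if_neg]; intro hc; exact h ((pv_isupper_iff c).mpr hc)

theorem pv_upper_upper (c : Char) : PySem.Chars.upperChar (PySem.Chars.upperChar c) = PySem.Chars.upperChar c := by
  apply pv_char_eq_of_toNat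
  rw [pv_upper_toNat, pv_upper_toNat (c := c)]
  split_ifs <;> omega

theorem pv_lower_lower (c : Char) : PySem.Chars.lowerChar (PySem.Chars.lowerChar c) = PySem.Chars.lowerChar c := by
  apply pv_char_eq_of_toNat
  rw [pv_lower_toNat, pv_lower_toNat (c := c)]
  split_ifs <;> omega

theorem pv_upper_eq_nonletter (c p : Char) (hp : p.toNat < 65 ∨ 90 < p.toNat)
    (h : PySem.Chars.upperChar c = p) : c = p := by
  apply pv_char_eq_of_toNat
  have := congrArg Char.toNat h
  rw [pv_upper_toNat] at this
  split_ifs at this <;> omega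

theorem pyCapitalize_idem (s : String) : pyCapitalize (pyCapitalize s) = pyCapitalize s := by
  unfold pyCapitalize
  cases h : s.toList with
  | nil => rfl
  | cons c cs =>
    simp [pv_upper_upper]
    congr 1
    congr 1
    exact List.map_congr_left fun a _ => pv_lower_lower a

theorem capF_cap (t : String) : capF (pyCapitalize t) = pyCapitalize t := by
  unfold capF
  split_ifs with h
  · exact pyCapitalize_idem t
  · rfl

theorem pv_cap_single (t : String) (p : Char) (hp : p.toNat < 65 ∨ 90 < p.toNat)
    (h : pyCapitalize t = String.ofList [p]) : t = String.ofList [p] := by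
  unfold pyCapitalize at h
  cases ht : t.toList with
  | nil => rw [ht] at h; exact absurd (congrArg String.toList h) (by simp)
  | cons c cs =>
    rw [ht] at h
    have h2 : PySem.Chars.upperChar c :: cs.map PySem.Chars.lowerChar = [p] := by
      have := congrArg String.toList h
      simpa using this
    obtain ⟨hc', hcs'⟩ := List.cons_eq_cons.mp h2
    have hcs : cs = [] := by simpa using hcs'
    have hc : c = p := pv_upper_eq_nonletter c p hp hc'
    have htp : t.toList = [p] := by rw [ht, hcs, hc]
    calc t = String.ofList t.toList := by simp
    _ = String.ofList [p] := by rw [htp]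

theorem cap_mem_valid (t : String) (h : pyCapitalize t ∈ VALID_PUNCTUATION) : t ∈ VALID_PUNCTUATION := by
  simp only [VALID_PUNCTUATION, List.mem_cons, List.not_mem_nil, or_false] at h ⊢
  have e1 : ("?" : String) = String.ofList ['?'] := by decide
  have e2 : ("." : String) = String.ofList ['.'] := by decide
  have e3 : ("!" : String) = String.ofList ['!'] := by decide
  have e4 : ("," : String) = String.ofList [','] := by decide
  have e5 : (":" : String) = String.ofList [':'] := by decide
  have e6 : (";" : String) = String.ofList [';'] := by decide
  rcases h with h|h|h|h|h|h
  · exact Or.inl ((e1 ▸ pv_cap_single t '?' (by decide)) (e1 ▸ h))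
  · exact Or.inr (Or.inl ((e2 ▸ pv_cap_single t '.' (by decide)) (e2 ▸ h)))
  · exact Or.inr (Or.inr (Or.inl ((e3 ▸ pv_cap_single t '!' (by decide)) (e3 ▸ h))))
  · exact Or.inr (Or.inr (Or.inr (Or.inl ((e4 ▸ pv_cap_single t ',' (by decide)) (e4 ▸ h)))))
  · exact Or.inr (Or.inr (Or.inr (Or.inr (Or.inl ((e5 ▸ pv_cap_single t ':' (by decide)) (e5 ▸ h))))))
  · exact Or.inr (Or.inr (Or.inr (Or.inr (Or.inr ((e6 ▸ pv_cap_single t ';' (by decide)) (e6 ▸ h))))))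

-- unfolding lemmas for the WF-recursive qRec
theorem qRec_nil : qRec [] = [] := by rw [qRec.eq_def]

theorem qRec_cons_eos_nil (t : String) (h : t ∈ END_OF_SENTENCE_PUNCTUATION) :
    qRec [t] = [t] := by rw [qRec.eq_def]; simp [h]

theorem qRec_cons_eos_cons (t u : String) (us : List String) (h : t ∈ END_OF_SENTENCE_PUNCTUATION) :
    qRec (t :: u :: us) = t :: qRec (pyCapitalize u :: us) := by rw [qRec.eq_def]; simp [h]

theorem qRec_cons_not (t : String) (ts : List String) (h : t ∉ END_OF_SENTENCE_PUNCTUATION) :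
    qRec (t :: ts) = t :: qRec ts := by rw [qRec.eq_def]; simp [h]

-- list helpers
theorem pv_getD_append (pre : List String) (t : String) (ts : List String) (d : String) :
    (pre ++ t :: ts).getD pre.length d = t := by
  induction pre with
  | nil => rfl
  | cons x xs ih => simpa using ih

theorem pv_set_append (pre : List String) (t v : String) (ts : List String) :
    (pre ++ t :: ts).set pre.length v = pre ++ v :: ts := by
  induction pre with
  | nil => rfl
  | cons x xs ih => simpa using ih

theorem pv_eraseIdx_append (pre : List String) (t : String) (ts : List String) :
    (pre ++ t :: ts).eraseIdx pre.length = pre ++ ts := by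
  induction pre with
  | nil => rfl
  | cons x xs ih => simpa using ih

theorem pv_getD_last (out : List String) (r : List String) (d : String) (h : out ≠ []) :
    (out ++ r).getD (out.length - 1) d = out.getLastD d := by
  induction out with
  | nil => exact absurd rfl h
  | cons x xs ih =>
    cases xs with
    | nil => simp [List.getD]
    | cons y ys =>
      have h2 : (y :: ys : List String) ≠ [] := by simp
      have := ih h2
      simpa [List.getD, List.getLastD] using this

theorem pv_set_last (out : List String) (v : String) (h : out ≠ []) :
    out.set (out.length - 1) v = out.dropLast ++ [v] := by
  induction out with
  | nil => exact absurd rfl h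
  | cons x xs ih =>
    cases xs with
    | nil => rfl
    | cons y ys =>
      have h2 : (y :: ys : List String) ≠ [] := by simp
      have := ih h2
      simpa using this

theorem pv_set_append_left (out : List String) (r : List String) (i : Nat) (v : String) (hi : i < out.length) :
    (out ++ r).set i v = out.set i v ++ r := by
  induction out generalizing i with
  | nil => simp at hi
  | cons x xs ih =>
    cases i with
    | zero => rfl
    | succ n =>
      have := ih n (by simpa using hi)
      simpa using this

-- the joining fold over range = foldl over the list
theorem pv_join_aux (m : List String) : ∀ (ts pre : List String) (s : String), m = pre ++ ts →
    (List.range' pre.length ts.length 1).foldl (fun s i => s ++ m.getD i "" ++ " ") s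
      = ts.foldl (fun s t => s ++ t ++ " ") s := by
  intro ts
  induction ts with
  | nil => intro pre s h; simp
  | cons t ts ih =>
    intro pre s h
    rw [List.length_cons, List.range'_succ]
    simp only [List.foldl_cons]
    have hget : m.getD pre.length "" = t := by rw [h]; exact pv_getD_append pre t ts ""
    rw [hget]
    have := ih (pre ++ [t]) (s ++ t ++ " ") (by simp [h])
    simpa using this

theorem pv_join (m : List String) (s : String) :
    (List.range m.length).foldl (fun s i => s ++ m.getD i "" ++ " ") s
      = m.foldl (fun s t => s ++ t ++ " ") s := by
  have := pv_join_aux m m [] s rfl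
  simpa [List.range_eq_range'] using this

-- pass 2 = map capF
theorem pv_pass2 : ∀ (ts pre : List String),
    (List.range' pre.length ts.length 1).foldl (fun acc i =>
        if pyCapitalize (acc.getD i "") ∈ ALWAYS_CAPITALIZE
        then acc.set i (pyCapitalize (acc.getD i "")) else acc) (pre ++ ts)
      = pre ++ ts.map capF := by
  intro ts
  induction ts with
  | nil => intro pre; simp
  | cons t ts ih =>
    intro pre
    rw [List.length_cons, List.range'_succ]
    simp only [List.foldl_cons, pv_getD_append]
    by_cases hc : pyCapitalize t ∈ ALWAYS_CAPITALIZE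
    · rw [if_pos hc, pv_set_append]
      have heq : pre ++ pyCapitalize t :: ts = (pre ++ [pyCapitalize t]) ++ ts := by simp
      rw [heq]
      have := ih (pre ++ [pyCapitalize t])
      simp only [List.length_append, List.length_cons, List.length_nil, Nat.zero_add] at this ⊢
      rw [this]
      simp [List.map_cons, capF, if_pos hc]
    · rw [if_neg hc]
      have heq : pre ++ t :: ts = (pre ++ [t]) ++ ts := by simp
      rw [heq]
      have := ih (pre ++ [t])
      simp only [List.length_append, List.length_cons, List.length_nil, Nat.zero_add] at this ⊢
      rw [this]
      simp [List.map_cons, capF, if_neg hc]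

-- pass 3 = qRec
theorem pv_pass3 : ∀ (n : Nat) (ts pre : List String), ts.length = n →
    (List.range' pre.length ts.length 1).foldl (fun acc k =>
        if acc.getD k "" ∈ END_OF_SENTENCE_PUNCTUATION ∧ k+1 < acc.length
        then acc.set (k+1) (pyCapitalize (acc.getD (k+1) "")) else acc) (pre ++ ts)
      = pre ++ qRec ts := by
  intro n
  induction n with
  | zero =>
    intro ts pre hlen
    have : ts = [] := by
      cases ts with
      | nil => rfl
      | cons a l => simp at hlen
    subst this; simp [qRec_nil]
  | succ n ih =>
    intro ts pre hlen
    obtain ⟨t, ts', rfl⟩ : ∃ t ts', ts = t :: ts' := by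
      cases ts with
      | nil => simp at hlen
      | cons a l => exact ⟨a, l, rfl⟩
    have hlen' : ts'.length = n := by simpa using hlen
    rw [List.length_cons, List.range'_succ]
    simp only [List.foldl_cons, pv_getD_append]
    by_cases heos : t ∈ END_OF_SENTENCE_PUNCTUATION
    · cases ts' with
      | nil =>
        have hcond : ¬ (t ∈ END_OF_SENTENCE_PUNCTUATION ∧ pre.length + 1 < (pre ++ [t]).length) := by
          simp
        rw [if_neg hcond]
        simp [qRec_cons_eos_nil t heos]
      | cons u us =>
        have hlt : pre.length + 1 < (pre ++ t :: u :: us).length := by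
          simp only [List.length_append, List.length_cons]; omega
        rw [if_pos ⟨heos, hlt⟩]
        have hg2 : (pre ++ t :: u :: us).getD (pre.length + 1) "" = u := by
          have := pv_getD_append (pre ++ [t]) u us ""
          simpa using this
        rw [hg2]
        have hs2 : (pre ++ t :: u :: us).set (pre.length + 1) (pyCapitalize u)
            = (pre ++ [t]) ++ pyCapitalize u :: us := by
          have := pv_set_append (pre ++ [t]) u (pyCapitalize u) us
          simpa using this
        rw [hs2]
        have hind := ih (pyCapitalize u :: us) (pre ++ [t]) (by simpa using hlen')
        simp only [List.length_append, List.length_cons, List.length_nil, Nat.zero_add] at hind ⊢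
        rw [hind, qRec_cons_eos_cons t u us heos]
        simp
    · have hcond : ¬ (t ∈ END_OF_SENTENCE_PUNCTUATION ∧ pre.length + 1 < (pre ++ t :: ts').length) := by
        intro hx; exact heos hx.1
      rw [if_neg hcond]
      have heq : pre ++ t :: ts' = (pre ++ [t]) ++ ts' := by simp
      rw [heq]
      have hind := ih ts' (pre ++ [t]) hlen'
      simp only [List.length_append, List.length_cons, List.length_nil, Nat.zero_add] at hind ⊢
      rw [hind, qRec_cons_not t ts' heos]
      simp

theorem pv_cap_capF (u : String) : pyCapitalize (capF u) = pyCapitalize u := by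
  unfold capF; split_ifs with h
  · exact pyCapitalize_idem u
  · rfl

theorem pv_capsRec_q : ∀ (ts : List String) (b : Bool), capsRec ts b = qRec (headApply b ts) := by
  intro ts
  induction ts with
  | nil => intro b; simp [capsRec, headApply, qRec_nil]
  | cons t ts ih =>
    intro b
    have hw : capsRec (t :: ts) b
        = (if b then pyCapitalize t else capF t)
          :: capsRec ts (decide ((if b then pyCapitalize t else capF t) ∈ END_OF_SENTENCE_PUNCTUATION)) := rfl
    rw [hw]
    have hrhs : headApply b (t :: ts) = (if b then pyCapitalize t else capF t) :: ts.map capF := rfl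
    rw [hrhs]
    by_cases heos : (if b then pyCapitalize t else capF t) ∈ END_OF_SENTENCE_PUNCTUATION
    · rw [decide_eq_true heos]
      cases ts with
      | nil =>
        simp only [List.map_nil]
        rw [qRec_cons_eos_nil _ heos]
        rfl
      | cons u us =>
        simp only [List.map_cons]
        rw [qRec_cons_eos_cons _ _ _ heos, ih true, pv_cap_capF]
        rfl
    · rw [decide_eq_false heos, qRec_cons_not _ _ heos, ih false]
      cases ts with
      | nil => rfl
      | cons u us => rfl

-- B's first pass equals the proof-side capitalization chain
theorem pv_altCaps (ts : List String) : ∀ (b : Bool), altCaps ts b = capsRec ts b := by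
  induction ts with
  | nil => intro b; rfl
  | cons t ts ih =>
    intro b
    have hwe : (if b = true ∨ pyCapitalize t ∈ ALWAYS_CAPITALIZE then pyCapitalize t else t)
        = (if b then pyCapitalize t else capF t) := by
      cases b <;> simp [capF]
    show (if b = true ∨ pyCapitalize t ∈ ALWAYS_CAPITALIZE then pyCapitalize t else t)
        :: altCaps ts (decide ((if b = true ∨ pyCapitalize t ∈ ALWAYS_CAPITALIZE then pyCapitalize t else t) ∈ END_OF_SENTENCE_PUNCTUATION))
      = capsRec (t :: ts) b
    rw [hwe, ih]
    rfl

-- unfolding lemmas for altPair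
theorem altPair_nil : altPair [] = [] := rfl
theorem altPair_single (w : String) : altPair [w] = [w] := rfl
theorem altPair_cons2 (w p : String) (rest : List String) :
    altPair (w :: p :: rest)
      = if p ∈ VALID_PUNCTUATION then (w ++ p) :: altPair rest
        else w :: altPair (p :: rest) := rfl

-- B's pairing pass equals bmerge with an open block
theorem pv_pair_bmerge : ∀ (n : Nat) (ws : List String), ws.length ≤ n →
    ∀ (out : List String) (w : String),
    bmerge (out ++ [w]) ws false = out ++ altPair (w :: ws) := by
  intro n
  induction n with
  | zero =>
    intro ws hlen out w
    have : ws = [] := by cases ws with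
      | nil => rfl
      | cons a l => simp at hlen
    subst this
    simp [bmerge, altPair_single]
  | succ n ih =>
    intro ws hlen out w
    cases ws with
    | nil => simp [bmerge, altPair_single]
    | cons p rest =>
      rw [altPair_cons2]
      by_cases hp : p ∈ VALID_PUNCTUATION
      · have hcond : p ∈ VALID_PUNCTUATION ∧ (out ++ [w]) ≠ [] := ⟨hp, by simp⟩
        have hstep : bmerge (out ++ [w]) (p :: rest) false
            = bmerge (out ++ [w ++ p]) rest true := by
          show (if (false : Bool) then _ else if p ∈ VALID_PUNCTUATION ∧ (out ++ [w]) ≠ [] then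
              bmerge ((out ++ [w]).dropLast ++ [(out ++ [w]).getLastD "" ++ p]) rest true
            else bmerge ((out ++ [w]) ++ [p]) rest false) = _
          rw [if_neg (by simp), if_pos hcond]
          simp [List.getLastD_concat]
        rw [hstep, if_pos hp]
        cases rest with
        | nil => simp [bmerge, altPair_nil]
        | cons u us =>
          have hstep2 : bmerge (out ++ [w ++ p]) (u :: us) true
              = bmerge ((out ++ [w ++ p]) ++ [u]) us false := by
            simp [bmerge]
          rw [hstep2, ih us (by simp at hlen; omega) (out ++ [w ++ p]) u]
          simp
      · have hcond : ¬ (p ∈ VALID_PUNCTUATION ∧ (out ++ [w]) ≠ []) := fun h => hp h.1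
        have hstep : bmerge (out ++ [w]) (p :: rest) false
            = bmerge ((out ++ [w]) ++ [p]) rest false := by
          show (if (false : Bool) then _ else if p ∈ VALID_PUNCTUATION ∧ (out ++ [w]) ≠ [] then
              bmerge ((out ++ [w]).dropLast ++ [(out ++ [w]).getLastD "" ++ p]) rest true
            else bmerge ((out ++ [w]) ++ [p]) rest false) = _
          rw [if_neg (by simp), if_neg hcond]
        rw [hstep, if_neg hp]
        have := ih rest (by simp at hlen; omega) (out ++ [w]) p
        rw [this]
        simp

theorem pv_altPair_bmerge (ws : List String) : altPair ws = bmerge [] ws false := by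
  cases ws with
  | nil => rfl
  | cons h rest =>
    have hstep : bmerge ([] : List String) (h :: rest) false = bmerge [h] rest false := by
      show (if (false : Bool) then _ else if h ∈ VALID_PUNCTUATION ∧ ([] : List String) ≠ [] then
          bmerge (([] : List String).dropLast ++ [([] : List String).getLastD "" ++ h]) rest true
        else bmerge ([] ++ [h]) rest false) = _
      rw [if_neg (by simp), if_neg (by simp)]
      rfl
    rw [hstep]
    have := pv_pair_bmerge rest.length rest (le_refl _) [] h
    simpa using this.symm

theorem pv_merge (ws : List String) : ∀ (fuel : Nat) (out : List String) (b : Bool),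
    out ≠ [] → ws.length ≤ fuel →
    mergeLoopA fuel (out ++ ws) (out.length + b.toNat) (out.length + ws.length)
      = bmerge out ws b := by
  induction ws with
  | nil =>
    intro fuel out b hne _
    cases fuel with
    | zero => simp [mergeLoopA, bmerge]
    | succ f =>
      have hnl : ¬ (out.length + b.toNat < out.length + ([] : List String).length) := by
        cases b <;> simp [Bool.toNat]
      simp only [mergeLoopA, bmerge, if_neg hnl, List.append_nil]
  | cons w ws ih =>
    intro fuel out b hne hfuel
    have hpos : 0 < out.length := List.length_pos_iff.mpr hne
    cases b with
    | true =>
      have heq : out ++ w :: ws = (out ++ [w]) ++ ws := by simp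
      have h1 : out.length + (true : Bool).toNat = (out ++ [w]).length + (false : Bool).toNat := by
        simp [Bool.toNat]
      have h2 : out.length + (w :: ws).length = (out ++ [w]).length + ws.length := by
        simp only [List.length_append, List.length_cons, List.length_nil]; omega
      rw [heq, h1, h2, ih fuel (out ++ [w]) false (by simp) (by simp at hfuel; omega)]
      rfl
    | false =>
      cases fuel with
      | zero => simp at hfuel
      | succ f =>
        simp only [Bool.toNat_false, Nat.add_zero]
        have hfuel' : ws.length ≤ f := by simp at hfuel; omega
        have hlt : out.length < out.length + (w :: ws).length := by simp
        have hget : (out ++ w :: ws).getD out.length "" = w := pv_getD_append out w ws ""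
        rw [mergeLoopA, if_pos hlt, hget]
        by_cases hw : w ∈ VALID_PUNCTUATION
        · rw [if_pos hw]
          have hj0 : out.length ≠ 0 := by omega
          rw [if_neg hj0]
          have hgl : (out ++ w :: ws).getD (out.length - 1) "" = out.getLastD "" :=
            pv_getD_last out (w :: ws) "" hne
          rw [hgl]
          have hset : (out ++ w :: ws).set (out.length - 1) (out.getLastD "" ++ w)
              = (out.dropLast ++ [out.getLastD "" ++ w]) ++ w :: ws := by
            rw [pv_set_append_left out (w :: ws) (out.length - 1) _ (by omega),
              pv_set_last out _ hne]
          rw [hset]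
          have hlen2 : (out.dropLast ++ [out.getLastD "" ++ w]).length = out.length := by
            simp only [List.length_append, List.length_dropLast, List.length_cons, List.length_nil]
            omega
          have herase : ((out.dropLast ++ [out.getLastD "" ++ w]) ++ w :: ws).eraseIdx out.length
              = (out.dropLast ++ [out.getLastD "" ++ w]) ++ ws := by
            have := pv_eraseIdx_append (out.dropLast ++ [out.getLastD "" ++ w]) w ws
            rw [hlen2] at this
            exact this
          rw [herase]
          have hj : out.length + 1 = (out.dropLast ++ [out.getLastD "" ++ w]).length + (true : Bool).toNat := by
            rw [hlen2]; rfl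
          have hx : out.length + (w :: ws).length - 1
              = (out.dropLast ++ [out.getLastD "" ++ w]).length + ws.length := by
            rw [hlen2]; simp only [List.length_cons]; omega
          rw [hj, hx, ih f (out.dropLast ++ [out.getLastD "" ++ w]) true (by simp) hfuel']
          have hb : bmerge out (w :: ws) false
              = bmerge (out.dropLast ++ [out.getLastD "" ++ w]) ws true := by
            simp [bmerge, hw, hne]
          rw [hb]
        · rw [if_neg hw]
          have heq : out ++ w :: ws = (out ++ [w]) ++ ws := by simp
          have hj : out.length + 1 = (out ++ [w]).length + (false : Bool).toNat := by simp [Bool.toNat]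
          have hx : out.length + (w :: ws).length = (out ++ [w]).length + ws.length := by
            simp only [List.length_append, List.length_cons, List.length_nil]; omega
          rw [heq, hj, hx, ih f (out ++ [w]) false (by simp) hfuel']
          have hnc : ¬ (w ∈ VALID_PUNCTUATION ∧ out ≠ []) := fun h => hw h.1
          have hb : bmerge out (w :: ws) false = bmerge (out ++ [w]) ws false := by
            simp [bmerge, hnc]
          rw [hb]

-- A's else-branch pipeline, factored: the three capitalization passes equal capsRec, then the merge loop
theorem pv_pipelineA (t : String) (ts : List String) :
    gen_bot_text (t :: ts) false
      = (mergeLoopA (capsRec (t :: ts) true).length (capsRec (t :: ts) true) 0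
          (capsRec (t :: ts) true).length).foldl (fun s w => s ++ w ++ " ") "" := by
  simp only [gen_bot_text, Bool.false_eq_true, if_false]
  have hl1 : (t :: ts).set 0 (pyCapitalize ((t :: ts).getD 0 "")) = pyCapitalize t :: ts := by
    simp [List.getD]
  rw [hl1]
  have hl2 : (List.range (pyCapitalize t :: ts).length).foldl (fun acc i =>
      if pyCapitalize (acc.getD i "") ∈ ALWAYS_CAPITALIZE
      then acc.set i (pyCapitalize (acc.getD i "")) else acc) (pyCapitalize t :: ts)
      = pyCapitalize t :: ts.map capF := by
    rw [List.range_eq_range']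
    have := pv_pass2 (pyCapitalize t :: ts) []
    simpa [capF_cap] using this
  rw [hl2]
  have hl3 : (List.range (pyCapitalize t :: ts.map capF).length).foldl (fun acc k =>
      if acc.getD k "" ∈ END_OF_SENTENCE_PUNCTUATION ∧ k+1 < acc.length
      then acc.set (k+1) (pyCapitalize (acc.getD (k+1) "")) else acc) (pyCapitalize t :: ts.map capF)
      = qRec (pyCapitalize t :: ts.map capF) := by
    rw [List.range_eq_range']
    have := pv_pass3 (pyCapitalize t :: ts.map capF).length (pyCapitalize t :: ts.map capF) [] rfl
    simpa using this
  rw [hl3]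
  have hcaps : qRec (pyCapitalize t :: ts.map capF) = capsRec (t :: ts) true := by
    rw [pv_capsRec_q (t :: ts) true]
    rfl
  rw [hcaps, pv_join]

theorem pv_pipelineB (tl : List String) :
    gen_bot_text_alt tl false
      = (bmerge [] (capsRec tl true) false).foldl (fun s w => s ++ w ++ " ") "" := by
  simp only [gen_bot_text_alt, Bool.false_eq_true, if_false]
  rw [pv_altCaps tl true, pv_altPair_bmerge]

-- ===== VERDICT (by name: the statement is the Claim_ definition above) =====
theorem gen_bot_text_spec : Claim_equal_gen_bot_text := by
  intro tl ba hdom hpre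
  unfold Spec_gen_bot_text
  cases ba with
  | true =>
    simp only [gen_bot_text, gen_bot_text_alt, if_true]
    exact pv_join tl ""
  | false =>
    have hne : tl ≠ [] ∧ tl.headD "" ∉ VALID_PUNCTUATION := by
      rcases hpre with h | h
      · exact absurd h (by simp)
      · exact h
    obtain ⟨t, ts, rfl⟩ : ∃ t ts, tl = t :: ts := by
      cases tl with
      | nil => exact absurd rfl hne.1
      | cons a l => exact ⟨a, l, rfl⟩
    have hval : t ∉ VALID_PUNCTUATION := by simpa using hne.2
    have hhd2 : pyCapitalize t ∉ VALID_PUNCTUATION := fun h => hval (cap_mem_valid t h)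
    rw [pv_pipelineA, pv_pipelineB]
    congr 1
    have hconsc : capsRec (t :: ts) true
        = pyCapitalize t :: capsRec ts (decide (pyCapitalize t ∈ END_OF_SENTENCE_PUNCTUATION)) := rfl
    set rest := capsRec ts (decide (pyCapitalize t ∈ END_OF_SENTENCE_PUNCTUATION)) with hrest
    rw [hconsc]
    have hmergestep : mergeLoopA (pyCapitalize t :: rest).length (pyCapitalize t :: rest) 0
        (pyCapitalize t :: rest).length = bmerge [pyCapitalize t] rest false := by
      rw [List.length_cons, mergeLoopA, if_pos (by omega)]
      have hg : (pyCapitalize t :: rest).getD 0 "" = pyCapitalize t := rfl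
      rw [hg, if_neg hhd2]
      have := pv_merge rest rest.length [pyCapitalize t] false (by simp) (le_refl _)
      simpa [Bool.toNat, Nat.add_comm] using this
    rw [hmergestep]
    have halt : bmerge [] (pyCapitalize t :: rest) false = bmerge [pyCapitalize t] rest false := by
      rw [bmerge]
      simp
    rw [halt]
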